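-- pv_equiv track=rewrite | github.com/XOM91K/EGE | olds/Alexander_2024_Ege/25/7.py | get_chet_dels
-- ===== SOURCE A (Python) =====
-- def get_chet_dels(n):
--     l = []
--     for x in range(1, int(n ** 0.5) + 1):
--         if n % x == 0:
--             if x % 2 == 0:
--                 l.append(x)
--             if (n // x) % 2 == 0:
--                 l.append(n // x)
--     return sorted(set(l))
-- ===== SOURCE B (Python) =====
-- def get_chet_dels(n):
--     if n % 2 != 0:
--         return []
--     m = n // 2
--     # even divisors of n = 2m are exactly 2*e for the divisors e of m
--     small = []
--     large = []
--     r = int(m ** 0.5)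
--     for e in range(1, r + 1):
--         if m % e == 0:
--             small.append(2 * e)
--             q = m // e
--             if q != e:
--                 large.append(2 * q)
--     large.reverse()
--     return small + large
-- ===== Notes on version B (the rewrite author's own statement) =====
-- stated objective: alternative
-- what changed: B factors out 2 (even divisors of n are exactly 2*e for divisors e of n//2, none when n is odd) and collects each divisor pair of n//2 into an ascending small-half and a descending large-half list merged by one reverse, so A's set-dedup and final sort disappear and the loop runs to sqrt(n/2) instead of sqrt(n).
import Mathlib
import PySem

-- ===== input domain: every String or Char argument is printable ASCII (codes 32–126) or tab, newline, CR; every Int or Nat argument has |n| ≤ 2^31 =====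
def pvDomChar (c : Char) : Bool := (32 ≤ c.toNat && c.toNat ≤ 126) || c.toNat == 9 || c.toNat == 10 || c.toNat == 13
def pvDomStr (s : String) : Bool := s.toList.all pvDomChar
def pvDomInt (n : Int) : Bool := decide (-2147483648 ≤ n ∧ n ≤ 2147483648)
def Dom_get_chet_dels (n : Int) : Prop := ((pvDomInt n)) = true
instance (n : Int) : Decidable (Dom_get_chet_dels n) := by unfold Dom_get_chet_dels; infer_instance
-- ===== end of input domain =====

-- B factors out 2 (even divisors of n = 2·divisors of n//2 when n is even, none when n is odd) and
-- collects each divisor pair into an ascending 'small' and a descending 'large' list merged by one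
-- reverse, so A's set-dedup and sort disappear; equal on all n ≥ 0.

-- ===== PORT A =====
-- int(n ** 0.5): for 0 ≤ n ≤ 2^31 (Pre_ + Dom) the float power is exact enough that this is the
-- floor square root, ported as Nat.sqrt; negative n raises TypeError and is excluded by Pre_.
def get_chet_dels (n : Int) : List Int :=
  let l : List Int := (PySem.List.pyRange 1 ((Nat.sqrt n.toNat : Int) + 1) 1).foldl
    (fun l x =>
      if PySem.Int.mod n x = 0 then
        let l1 := if PySem.Int.mod x 2 = 0 then l ++ [x] else l
        if PySem.Int.mod (PySem.Int.floordiv n x) 2 = 0 then l1 ++ [PySem.Int.floordiv n x] else l1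
      else l) []
  PySem.List.sorted (PySem.Set.ofList l) (fun x => x) false

-- ===== PORT B =====
def get_chet_dels_alt (n : Int) : List Int :=
  if PySem.Int.mod n 2 ≠ 0 then []
  else
    let m := PySem.Int.floordiv n 2
    -- int(m ** 0.5): exact floor square root for 0 ≤ m ≤ 2^30 (Pre_ + Dom), ported as Nat.sqrt
    let p := (PySem.List.pyRange 1 ((Nat.sqrt m.toNat : Int) + 1) 1).foldl
      (fun (p : List Int × List Int) e =>
        if PySem.Int.mod m e = 0 then
          let small := p.1 ++ [2 * e]
          let q := PySem.Int.floordiv m e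
          if q ≠ e then (small, p.2 ++ [2 * q]) else (small, p.2)
        else p) ([], [])
    p.1 ++ p.2.reverse

-- ===== PRECONDITION & SPEC =====
-- Pre_ excludes n < 0, where A raises TypeError (int() of the complex value n ** 0.5).
def Pre_get_chet_dels (n : Int) : Prop := 0 ≤ n
instance (n : Int) : Decidable (Pre_get_chet_dels n) := by unfold Pre_get_chet_dels; infer_instance
def pvWitness_get_chet_dels : Int := 36

def Spec_get_chet_dels (n : Int) (out : List Int) : Prop := out = get_chet_dels_alt n
instance (n : Int) (out : List Int) : Decidable (Spec_get_chet_dels n out) := by unfold Spec_get_chet_dels; infer_instance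

-- ===== CLAIM (what is proved, stated in full; the proofs are below) =====
def Claim_equal_get_chet_dels : Prop := ∀ (n : Int), Dom_get_chet_dels n → Pre_get_chet_dels n → Spec_get_chet_dels n (get_chet_dels n)

-- ===== LEMMAS AND PROOFS =====

-- the contribution of one loop iteration x of A to the collected list
def pvContrib (n x d : Int) : Prop :=
  PySem.Int.mod n x = 0 ∧
    ((d = x ∧ PySem.Int.mod x 2 = 0) ∨
     (d = PySem.Int.floordiv n x ∧ PySem.Int.mod (PySem.Int.floordiv n x) 2 = 0))

lemma mem_step (n : Int) (l : List Int) (x d : Int) :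
    d ∈ (if PySem.Int.mod n x = 0 then
          let l1 := if PySem.Int.mod x 2 = 0 then l ++ [x] else l
          if PySem.Int.mod (PySem.Int.floordiv n x) 2 = 0 then l1 ++ [PySem.Int.floordiv n x] else l1
        else l)
    ↔ d ∈ l ∨ pvContrib n x d := by
  unfold pvContrib
  split_ifs <;> (try simp only [List.mem_append, List.mem_singleton]) <;> tauto

lemma mem_loop (n : Int) (xs : List Int) (acc : List Int) (d : Int) :
    d ∈ xs.foldl
      (fun l x =>
        if PySem.Int.mod n x = 0 then
          let l1 := if PySem.Int.mod x 2 = 0 then l ++ [x] else l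
          if PySem.Int.mod (PySem.Int.floordiv n x) 2 = 0 then l1 ++ [PySem.Int.floordiv n x] else l1
        else l) acc
    ↔ d ∈ acc ∨ ∃ x ∈ xs, pvContrib n x d := by
  induction xs generalizing acc with
  | nil => simp
  | cons y ys ih =>
    rw [List.foldl_cons, ih, mem_step, List.exists_mem_cons_iff]
    tauto

-- characterisation of A's collected set: exactly the even divisors of n in [1, n]
lemma contrib_char (n d : Int) (hn : 0 ≤ n) :
    (∃ x ∈ PySem.List.pyRange 1 ((Nat.sqrt n.toNat : Int) + 1) 1, pvContrib n x d)
    ↔ (1 ≤ d ∧ d < n + 1 ∧ PySem.Int.mod n d = 0 ∧ PySem.Int.mod d 2 = 0) := by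
  have hsq1 : ((Nat.sqrt n.toNat : Int)) * ((Nat.sqrt n.toNat : Int)) ≤ n := by
    have h2 := Int.ofNat_le.mpr (Nat.sqrt_le' n.toNat)
    rw [Nat.cast_pow, pow_two] at h2; omega
  have hsq2 : n < ((Nat.sqrt n.toNat : Int) + 1) * ((Nat.sqrt n.toNat : Int) + 1) := by
    have h2 := Int.ofNat_lt.mpr (Nat.lt_succ_sqrt' n.toNat)
    rw [Nat.succ_eq_add_one, Nat.cast_pow, Nat.cast_add, Nat.cast_one, pow_two] at h2; omega
  set r : Int := ((Nat.sqrt n.toNat : Int)) with hr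
  constructor
  · rintro ⟨x, hx, hmod, hd⟩
    rw [PySem.List.mem_pyRange_one] at hx
    obtain ⟨hx1, hx2⟩ := hx
    have hxpos : 0 < x := by omega
    have hxdvd : x ∣ n := (PySem.Int.mod_eq_zero_iff_dvd n x).mp hmod
    obtain ⟨k, hk⟩ := hxdvd
    have hfd : PySem.Int.floordiv n x = k := by
      rw [PySem.Int.floordiv_eq_ediv_of_pos hxpos, hk, Int.mul_ediv_cancel_left _ (by omega)]
    have hkpos : 0 ≤ k := by nlinarith
    have hxr : x ≤ r := by omega
    rcases hd with ⟨rfl, h2⟩ | ⟨rfl, h2⟩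
    · refine ⟨hx1, by nlinarith, ?_, h2⟩
      rw [PySem.Int.mod_eq_zero_iff_dvd]; exact ⟨k, hk⟩
    · rw [hfd] at h2 ⊢
      have hk1 : 1 ≤ k := by nlinarith
      refine ⟨hk1, by nlinarith, ?_, h2⟩
      rw [PySem.Int.mod_eq_zero_iff_dvd]; exact ⟨x, by linarith [hk, mul_comm x k]⟩
  · rintro ⟨hd1, hd2, hmod, h2⟩
    have hdpos : 0 < d := by omega
    have hddvd : d ∣ n := (PySem.Int.mod_eq_zero_iff_dvd n d).mp hmod
    obtain ⟨k, hk⟩ := hddvd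
    have hkpos : 1 ≤ k := by nlinarith
    by_cases hle : d ≤ r
    · refine ⟨d, ?_, hmod, Or.inl ⟨rfl, h2⟩⟩
      rw [PySem.List.mem_pyRange_one]; omega
    · -- d > r: use x = n / d = k, then n // x = d
      have hkr : k ≤ r := by nlinarith
      have hkdvd : PySem.Int.mod n k = 0 := by
        rw [PySem.Int.mod_eq_zero_iff_dvd]; exact ⟨d, by linarith [hk, mul_comm d k]⟩
      have hfd : PySem.Int.floordiv n k = d := by
        rw [PySem.Int.floordiv_eq_ediv_of_pos (by omega), hk, mul_comm,
          Int.mul_ediv_cancel_left _ (by omega)]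
      refine ⟨k, ?_, hkdvd, Or.inr ⟨hfd.symm, by rw [hfd]; exact h2⟩⟩
      rw [PySem.List.mem_pyRange_one]; omega

-- one loop step of B, split into its two independent accumulators
def pvSmallStep (m : Int) : List Int → Int → List Int := fun a e =>
  if PySem.Int.mod m e = 0 then a ++ [2 * e] else a

def pvLargeStep (m : Int) : List Int → Int → List Int := fun b e =>
  if PySem.Int.mod m e = 0 ∧ PySem.Int.floordiv m e ≠ e then b ++ [2 * PySem.Int.floordiv m e] else b

lemma bstep_eq (m : Int) :
    (fun (p : List Int × List Int) e =>
        if PySem.Int.mod m e = 0 then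
          let small := p.1 ++ [2 * e]
          let q := PySem.Int.floordiv m e
          if q ≠ e then (small, p.2 ++ [2 * q]) else (small, p.2)
        else p)
    = fun (p : List Int × List Int) e => (pvSmallStep m p.1 e, pvLargeStep m p.2 e) := by
  funext p e
  unfold pvSmallStep pvLargeStep
  split_ifs with h1 h2 <;> simp_all

lemma sqrt_facts (k : Int) (hk : 0 ≤ k) :
    0 ≤ ((Nat.sqrt k.toNat : Nat) : Int) ∧
    ((Nat.sqrt k.toNat : Nat) : Int) * ((Nat.sqrt k.toNat : Nat) : Int) ≤ k ∧
    k < (((Nat.sqrt k.toNat : Nat) : Int) + 1) * (((Nat.sqrt k.toNat : Nat) : Int) + 1) := by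
  refine ⟨by positivity, ?_, ?_⟩
  · have h2 := Int.ofNat_le.mpr (Nat.sqrt_le' k.toNat)
    rw [Nat.cast_pow, pow_two] at h2; omega
  · have h2 := Int.ofNat_lt.mpr (Nat.lt_succ_sqrt' k.toNat)
    rw [Nat.succ_eq_add_one, Nat.cast_pow, Nat.cast_add, Nat.cast_one, pow_two] at h2; omega

-- q = m // e for a positive divisor e of m
lemma floordiv_of_dvd {m e q : Int} (he : 1 ≤ e) (hq : m = e * q) :
    PySem.Int.floordiv m e = q := by
  rw [PySem.Int.floordiv_eq_ediv_of_pos (by omega), hq, Int.mul_ediv_cancel_left _ (by omega)]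

-- the cofactor of a divisor not exceeding the floor square root lies at or above it
lemma cofactor_ge {m r e q : Int} (hr : 0 ≤ r) (hr2 : r * r ≤ m)
    (he : 1 ≤ e) (her : e ≤ r) (hq : m = e * q) : r ≤ q := by
  nlinarith

-- strict cross bound: small-half entry < large-half entry
lemma cross_lt {m r e e' q' : Int} (hr : 0 ≤ r) (hr2 : r * r ≤ m)
    (he : 1 ≤ e) (her : e ≤ r) (_ : e ∣ m)
    (he' : 1 ≤ e') (her' : e' ≤ r) (hq' : m = e' * q') (hne : q' ≠ e') : e < q' := by
  have h1 : r ≤ q' := cofactor_ge hr hr2 he' her' hq'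
  by_contra h
  push_neg at h
  have he2 : e = r := by omega
  have hq2 : q' = r := by omega
  have : e' < r := by omega
  nlinarith

-- larger square-root-bounded divisor, smaller cofactor (strictly)
lemma cofactor_strict_anti {m a b qa qb : Int} (ha : 1 ≤ a) (hb : 1 ≤ b)
    (hab : a < b) (hqa : m = a * qa) (hqb : m = b * qb) (hm : 1 ≤ m) : qb < qa := by
  have hqb1 : 1 ≤ qb := by
    by_contra hq
    push_neg at hq
    nlinarith [mul_nonpos_of_nonneg_of_nonpos (show (0 : Int) ≤ b by omega) (show qb ≤ 0 by omega)]
  by_contra h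
  push_neg at h
  nlinarith [mul_le_mul_of_nonneg_left h (show (0 : Int) ≤ a by omega)]

-- membership across B's two halves ↔ even divisor of 2m in [1, 2m]   (r = floor sqrt of m)
lemma even_mem (m r d : Int) (hr0 : 0 ≤ r) (hr1 : r * r ≤ m) (hr2 : m < (r + 1) * (r + 1)) :
    ((∃ e, (1 ≤ e ∧ e ≤ r ∧ e ∣ m) ∧ d = 2 * e) ∨
     (∃ e, (1 ≤ e ∧ e ≤ r ∧ e ∣ m ∧ PySem.Int.floordiv m e ≠ e) ∧ d = 2 * PySem.Int.floordiv m e))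
    ↔ (1 ≤ d ∧ d < 2 * m + 1 ∧ d ∣ 2 * m ∧ 2 ∣ d) := by
  constructor
  · rintro (⟨e, ⟨he1, he2, k, hk⟩, rfl⟩ | ⟨e, ⟨he1, he2, ⟨k, hk⟩, hne⟩, rfl⟩)
    · have hm1 : 1 ≤ m := by nlinarith
      have hk1 : 1 ≤ k := by nlinarith
      exact ⟨by omega, by nlinarith, ⟨k, by rw [hk]; ring⟩, ⟨e, rfl⟩⟩
    · have hm1 : 1 ≤ m := by nlinarith
      have hk1 : 1 ≤ k := by nlinarith
      rw [floordiv_of_dvd he1 hk]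
      exact ⟨by omega, by nlinarith, ⟨e, by rw [hk]; ring⟩, ⟨k, rfl⟩⟩
  · rintro ⟨hd1, hd2, hdvd, c, rfl⟩
    have hc1 : 1 ≤ c := by omega
    have hcm : c ∣ m := (mul_dvd_mul_iff_left (by norm_num : (2 : Int) ≠ 0)).mp hdvd
    obtain ⟨k, hk⟩ := hcm
    have hm1 : 1 ≤ m := by omega
    have hk1 : 1 ≤ k := by nlinarith
    by_cases hcr : c ≤ r
    · exact Or.inl ⟨c, ⟨hc1, hcr, k, hk⟩, rfl⟩
    · refine Or.inr ⟨k, ⟨hk1, ?_, ⟨c, by rw [hk]; ring⟩, ?_⟩, ?_⟩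
      · nlinarith
      · rw [floordiv_of_dvd hk1 (by rw [hk]; ring)]
        intro hck
        rw [← hck] at hk
        push_neg at hcr
        nlinarith
      · rw [floordiv_of_dvd hk1 (by rw [hk]; ring)]

theorem get_chet_dels_spec : Claim_equal_get_chet_dels := by
  intro n _ hpre
  have hn0 : (0 : Int) ≤ n := hpre
  unfold Spec_get_chet_dels get_chet_dels get_chet_dels_alt
  have hnsq := sqrt_facts n hn0
  set rn : Int := ((Nat.sqrt n.toNat : Nat) : Int) with hrn
  -- A's collected list membership, characterised once and for all
  have hAchar : ∀ d, (d ∈ (PySem.List.pyRange 1 (rn + 1) 1).foldl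
      (fun l x =>
        if PySem.Int.mod n x = 0 then
          let l1 := if PySem.Int.mod x 2 = 0 then l ++ [x] else l
          if PySem.Int.mod (PySem.Int.floordiv n x) 2 = 0 then l1 ++ [PySem.Int.floordiv n x] else l1
        else l) [])
      ↔ (1 ≤ d ∧ d < n + 1 ∧ PySem.Int.mod n d = 0 ∧ PySem.Int.mod d 2 = 0) := by
    intro d
    rw [mem_loop, contrib_char n d hpre]
    simp
  by_cases hpar : PySem.Int.mod n 2 = 0
  · -- n even: B takes its main branch
    rw [if_neg (by simpa using hpar)]
    have h2n : (2 : Int) ∣ n := (PySem.Int.mod_eq_zero_iff_dvd n 2).mp hpar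
    obtain ⟨m, hm⟩ := h2n
    have hfd2 : PySem.Int.floordiv n 2 = m := floordiv_of_dvd (by omega) hm
    rw [hfd2]
    have hm0 : 0 ≤ m := by omega
    have hmsq := sqrt_facts m hm0
    set r : Int := ((Nat.sqrt m.toNat : Nat) : Int) with hr
    simp only [bstep_eq, PySem.List.foldl_prod_mk]
    unfold pvSmallStep pvLargeStep
    rw [PySem.List.foldl_append_ite (p := fun e => PySem.Int.mod m e = 0) (f := fun e => 2 * e),
      PySem.List.foldl_append_ite
        (p := fun e => PySem.Int.mod m e = 0 ∧ PySem.Int.floordiv m e ≠ e)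
        (f := fun e => 2 * PySem.Int.floordiv m e)]
    simp only [List.nil_append]
    set F1 := (PySem.List.pyRange 1 (r + 1) 1).filter (fun e => decide (PySem.Int.mod m e = 0)) with hF1
    set F2 := (PySem.List.pyRange 1 (r + 1) 1).filter
      (fun e => decide (PySem.Int.mod m e = 0 ∧ PySem.Int.floordiv m e ≠ e)) with hF2
    have hmemF1 : ∀ e, e ∈ F1 ↔ 1 ≤ e ∧ e ≤ r ∧ e ∣ m := by
      intro e
      rw [hF1, List.mem_filter, PySem.List.mem_pyRange_one]
      simp only [decide_eq_true_eq, PySem.Int.mod_eq_zero_iff_dvd]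
      constructor
      · rintro ⟨⟨h1, h2⟩, h3⟩; exact ⟨h1, by omega, h3⟩
      · rintro ⟨h1, h2, h3⟩; exact ⟨⟨h1, by omega⟩, h3⟩
    have hmemF2 : ∀ e, e ∈ F2 ↔ 1 ≤ e ∧ e ≤ r ∧ e ∣ m ∧ PySem.Int.floordiv m e ≠ e := by
      intro e
      rw [hF2, List.mem_filter, PySem.List.mem_pyRange_one]
      simp only [decide_eq_true_eq, PySem.Int.mod_eq_zero_iff_dvd]
      constructor
      · rintro ⟨⟨h1, h2⟩, h3, h4⟩; exact ⟨h1, by omega, h3, h4⟩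
      · rintro ⟨h1, h2, h3, h4⟩; exact ⟨⟨h1, by omega⟩, h3, h4⟩
    -- strict order on B's output
    have hpair : (F1.map (fun e => 2 * e) ++ (F2.map (fun e => 2 * PySem.Int.floordiv m e)).reverse).Pairwise (· < ·) := by
      rw [List.pairwise_append]
      refine ⟨?_, ?_, ?_⟩
      · rw [List.pairwise_map]
        exact ((PySem.List.pairwise_lt_pyRange_one 1 (r + 1)).filter _).imp (by omega)
      · rw [List.pairwise_reverse, List.pairwise_map]
        refine List.Pairwise.imp_of_mem ?_ ((PySem.List.pairwise_lt_pyRange_one 1 (r + 1)).filter _)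
        intro a b ha hb hab
        rw [hmemF2] at ha hb
        obtain ⟨ha1, _, ⟨ka, hka⟩, _⟩ := ha
        obtain ⟨hb1, hbr, ⟨kb, hkb⟩, _⟩ := hb
        have hm1 : 1 ≤ m := by nlinarith
        rw [floordiv_of_dvd ha1 hka, floordiv_of_dvd hb1 hkb]
        have := cofactor_strict_anti ha1 hb1 hab hka hkb hm1
        omega
      · intro a ha b hb
        rw [List.mem_map] at ha
        rw [List.mem_reverse, List.mem_map] at hb
        obtain ⟨e, he, rfl⟩ := ha
        obtain ⟨e', he', rfl⟩ := hb
        rw [hmemF1] at he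
        rw [hmemF2] at he'
        obtain ⟨he1, her, hedvd⟩ := he
        obtain ⟨he'1, he'r, ⟨k', hk'⟩, hne⟩ := he'
        rw [floordiv_of_dvd he'1 hk'] at hne ⊢
        have := cross_lt hmsq.1 hmsq.2.1 he1 her hedvd he'1 he'r hk' hne
        omega
    apply PySem.List.sorted_eq_of_perm_of_pairwise_lt
    · rw [List.perm_ext_iff_of_nodup (hpair.imp ne_of_lt) (PySem.Set.nodup_ofList _)]
      intro d
      rw [PySem.Set.mem_ofList, hAchar]
      simp only [List.mem_append, List.mem_reverse, List.mem_map]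
      rw [PySem.Int.mod_eq_zero_iff_dvd, PySem.Int.mod_eq_zero_iff_dvd]
      have := even_mem m r d hmsq.1 hmsq.2.1 hmsq.2.2
      constructor
      · intro hB
        have hB' : (∃ e, (1 ≤ e ∧ e ≤ r ∧ e ∣ m) ∧ d = 2 * e) ∨
            (∃ e, (1 ≤ e ∧ e ≤ r ∧ e ∣ m ∧ PySem.Int.floordiv m e ≠ e) ∧ d = 2 * PySem.Int.floordiv m e) := by
          rcases hB with ⟨e, he, hee⟩ | ⟨e, he, hee⟩
          · exact Or.inl ⟨e, (hmemF1 e).mp he, hee.symm⟩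
          · exact Or.inr ⟨e, (hmemF2 e).mp he, hee.symm⟩
        obtain ⟨h1, h2, h3, h4⟩ := this.mp hB'
        exact ⟨h1, by omega, by rw [hm]; exact h3, h4⟩
      · rintro ⟨h1, h2, h3, h4⟩
        have hB := this.mpr ⟨h1, by omega, hm ▸ h3, h4⟩
        rcases hB with ⟨e, he, rfl⟩ | ⟨e, he, rfl⟩
        · exact Or.inl ⟨e, (hmemF1 e).mpr he, rfl⟩
        · exact Or.inr ⟨e, (hmemF2 e).mpr he, rfl⟩
    · exact hpair
  · -- n odd: every appended value would be an even divisor of n, so A collects nothing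
    rw [if_pos (by simpa using hpar)]
    rw [PySem.List.sorted_eq_nil_iff]
    have : ∀ d : Int, d ∉ (PySem.List.pyRange 1 (rn + 1) 1).foldl
      (fun l x =>
        if PySem.Int.mod n x = 0 then
          let l1 := if PySem.Int.mod x 2 = 0 then l ++ [x] else l
          if PySem.Int.mod (PySem.Int.floordiv n x) 2 = 0 then l1 ++ [PySem.Int.floordiv n x] else l1
        else l) [] := by
      intro d hd
      obtain ⟨_, _, h3, h4⟩ := (hAchar d).mp hd
      rw [PySem.Int.mod_eq_zero_iff_dvd] at h3 h4
      exact hpar ((PySem.Int.mod_eq_zero_iff_dvd n 2).mpr (dvd_trans h4 h3))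
    have hnil := List.eq_nil_iff_forall_not_mem.mpr this
    rw [hnil]
    rfl
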